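-- pv_equiv track=rewrite | github.com/tsfeith-epfl/LightField_Denoising | denoising_methods/LFDnPatch/utils/utils_patch.py | limited_insert
-- ===== SOURCE A (Python) =====
-- def limited_insert(arr, item, difference, num_patches):
--     """
--     Insert item into arr with binary search
--     """
--     if len(arr) < num_patches:
--         arr.append([difference, item])
--         if len(arr) == num_patches:
--             arr.sort(key=lambda x: x[0])
--     else:
--         if difference < arr[-1][0]:
--             left = 0
--             right = num_patches - 1
--             while left < right:
--                 mid = (left + right) // 2
--                 if arr[mid][0] < difference:
--                     left = mid + 1
--                 else:
--                     right = mid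
--             arr.insert(left, [difference, item])
--             arr.pop()
--     return arr
-- ===== SOURCE B (Python) =====
-- def limited_insert(arr, item, difference, num_patches):
--     """
--     Insert item into arr (kept as a sorted top-num_patches list) by counting,
--     not binary search. NOTE: mutates arr in place, like the original.
--     """
--     if len(arr) < num_patches:
--         arr.append([difference, item])
--         if len(arr) == num_patches:
--             arr.sort(key=lambda x: x[0])
--     elif difference < arr[-1][0]:
--         # insertion point = number of kept entries strictly better than this one
--         pos = sum(x[0] < difference for x in arr)
--         arr.insert(pos, [difference, item])
--         arr.pop()
--     return arr
-- ===== Notes on version B (the rewrite author's own statement) =====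
-- stated objective: simpler
-- what changed: The manual binary-search while-loop for the insertion point is replaced by a single counting pass: the new element goes at index = number of kept entries with key < difference; fill phase and gate are unchanged.
-- outside the precondition, e.g. on limited_insert([[1, 0], [5, 0]], 7, 3, 0): A returns [[3, 7], [1, 0]], B returns [[1, 0], [3, 7]]
import Mathlib
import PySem

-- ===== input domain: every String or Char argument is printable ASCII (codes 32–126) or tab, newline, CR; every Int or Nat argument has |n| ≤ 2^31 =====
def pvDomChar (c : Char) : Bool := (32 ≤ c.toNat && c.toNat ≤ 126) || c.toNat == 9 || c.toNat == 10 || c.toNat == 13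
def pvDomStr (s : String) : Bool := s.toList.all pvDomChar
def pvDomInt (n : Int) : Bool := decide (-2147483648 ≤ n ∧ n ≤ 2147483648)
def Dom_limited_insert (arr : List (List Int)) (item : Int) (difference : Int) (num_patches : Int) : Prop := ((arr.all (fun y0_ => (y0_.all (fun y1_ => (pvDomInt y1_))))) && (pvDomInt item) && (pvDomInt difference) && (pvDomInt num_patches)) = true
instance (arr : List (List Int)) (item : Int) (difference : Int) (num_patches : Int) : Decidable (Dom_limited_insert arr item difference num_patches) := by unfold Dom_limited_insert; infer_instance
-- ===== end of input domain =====

-- B replaces A's binary-search while-loop by a counting pass for the insertion point (simpler);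
-- both Pythons mutate arr in place identically, the equivalence proved is about the returned list.

-- ===== PORT A =====
-- x[0]; exact on nonempty x (Pre_ guarantees nonemptiness wherever A reads x[0])
def pvKey (x : List Int) : Int := x.headI

-- the while-loop of A; pyGetD is exact inside Pre_ (0 ≤ mid < len arr there)
def pvBisect (arr : List (List Int)) (difference : Int) (left right : Int) : Int :=
  if h : left < right then
    let mid := PySem.Int.floordiv (left + right) 2
    if pvKey (PySem.List.pyGetD arr mid []) < difference then
      pvBisect arr difference (mid + 1) right
    else
      pvBisect arr difference left mid
  else
    left
termination_by (right - left).toNat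
decreasing_by
  · have h1 : left ≤ PySem.Int.floordiv (left + right) 2 ∧
        PySem.Int.floordiv (left + right) 2 ≤ right :=
      PySem.Int.floordiv_two_mid_bounds (by omega)
    omega
  · have h1 : left ≤ PySem.Int.floordiv (left + right) 2 ∧
        PySem.Int.floordiv (left + right) 2 ≤ right :=
      PySem.Int.floordiv_two_mid_bounds (by omega)
    have h2 : PySem.Int.floordiv (left + right) 2 < right := by
      rw [PySem.Int.floordiv_lt_iff_lt_mul (by omega)]; omega
    omega

def limited_insert (arr : List (List Int)) (item : Int) (difference : Int) (num_patches : Int) : List (List Int) :=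
  if (arr.length : Int) < num_patches then
    let arr2 := arr ++ [[difference, item]]
    if (arr2.length : Int) = num_patches then PySem.List.sorted arr2 (fun x => pvKey x) else arr2
  else
    if difference < pvKey (PySem.List.pyGetD arr (-1) []) then   -- arr[-1][0]; exact inside Pre_
      let left := pvBisect arr difference 0 (num_patches - 1)
      -- arr.insert(left, [difference, item]); arr.pop()  — the list is nonempty after insert, so pop = dropLast
      (PySem.List.insert arr left [difference, item]).dropLast
    else
      arr

-- ===== PORT B =====
def limited_insert_alt (arr : List (List Int)) (item : Int) (difference : Int) (num_patches : Int) : List (List Int) :=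
  if (arr.length : Int) < num_patches then
    let arr2 := arr ++ [[difference, item]]
    if (arr2.length : Int) = num_patches then PySem.List.sorted arr2 (fun x => pvKey x) else arr2
  else
    if difference < pvKey (PySem.List.pyGetD arr (-1) []) then
      -- pos = sum(x[0] < difference for x in arr)
      let pos : Int := (arr.countP (fun x => pvKey x < difference) : Int)
      (PySem.List.insert arr pos [difference, item]).dropLast
    else
      arr

-- ===== PRECONDITION & SPEC =====
-- Pre_ excludes inputs on which A raises (empty arr or an empty inner list reached by arr[-1][0],
-- arr[mid][0] or the one-shot sort key) and, when the insertion gate fires, inputs violating the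
-- function's sorted top-k invariant (arr unsorted by key, or len(arr) ≠ num_patches): there A's
-- binary-search insertion point is an accident of its probing order over invariant-breaking input.
def Pre_limited_insert (arr : List (List Int)) (item : Int) (difference : Int) (num_patches : Int) : Prop :=
  if (arr.length : Int) < num_patches then
    ((arr.length : Int) + 1 = num_patches → ∀ x ∈ arr, x ≠ [])
  else
    arr ≠ [] ∧ arr.getLastD [] ≠ [] ∧
    (difference < (arr.getLastD []).headI →
      (arr.length : Int) = num_patches ∧ (∀ x ∈ arr, x ≠ []) ∧
      (arr.map (fun x => x.headI)).Pairwise (· ≤ ·))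
instance (arr : List (List Int)) (item : Int) (difference : Int) (num_patches : Int) : Decidable (Pre_limited_insert arr item difference num_patches) := by unfold Pre_limited_insert; infer_instance

def pvWitness_limited_insert : List (List Int) × Int × Int × Int := ([[1, 0], [3, 0]], 5, 2, 2)

def Spec_limited_insert (arr : List (List Int)) (item : Int) (difference : Int) (num_patches : Int) (out : List (List Int)) : Prop := out = limited_insert_alt arr item difference num_patches
instance (arr : List (List Int)) (item : Int) (difference : Int) (num_patches : Int) (out : List (List Int)) : Decidable (Spec_limited_insert arr item difference num_patches out) := by unfold Spec_limited_insert; infer_instance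

-- ===== CLAIM (what is proved, stated in full; the proofs are below) =====
def Claim_equal_limited_insert : Prop := ∀ (arr : List (List Int)) (item : Int) (difference : Int) (num_patches : Int), Dom_limited_insert arr item difference num_patches → Pre_limited_insert arr item difference num_patches → Spec_limited_insert arr item difference num_patches (limited_insert arr item difference num_patches)

-- ===== LEMMAS AND PROOFS =====

-- On a sorted key list, "key < d" holds exactly on the prefix of length countP (· < d).
lemma pv_countP_lt_char (ks : List Int) (d : Int) (hs : ks.Pairwise (· ≤ ·))
    (i : Nat) (hi : i < ks.length) :
    (ks[i] < d ↔ i < ks.countP (fun x => decide (x < d))) := by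
  induction ks generalizing i with
  | nil => simp at hi
  | cons a t ih =>
    rcases List.pairwise_cons.mp hs with ⟨ha, ht⟩
    by_cases had : a < d
    · cases i with
      | zero => simp [had]
      | succ j =>
        have hj : j < t.length := by simpa using hi
        have ihj := ih ht j hj
        simp only [List.getElem_cons_succ, List.countP_cons]
        constructor
        · intro h
          have := ihj.mp h
          simp [had]
          omega
        · intro h
          refine ihj.mpr ?_
          simp [had] at h
          omega
    · have hz : t.countP (fun x => decide (x < d)) = 0 := by
        apply List.countP_eq_zero.mpr
        intro b hb
        have : a ≤ b := ha b hb
        simp only [decide_eq_true_eq]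
        omega
      cases i with
      | zero => simp [had, hz]
      | succ j =>
        have hj : j < t.length := by simpa using hi
        have hb : a ≤ t[j] := ha _ (List.getElem_mem hj)
        simp only [List.getElem_cons_succ, List.countP_cons, hz]
        simp [had]
        omega

-- the same characterization with an Int index and Python indexing
lemma pv_key_char (arr : List (List Int)) (d : Int)
    (hs : (arr.map (fun x => x.headI)).Pairwise (· ≤ ·))
    (i : Int) (h0 : 0 ≤ i) (h1 : i < (arr.length : Int)) :
    (pvKey (PySem.List.pyGetD arr i []) < d ↔ i < (arr.countP (fun x => pvKey x < d) : Int)) := by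
  have hlt : i.toNat < arr.length := by omega
  have hg : PySem.List.pyGetD arr i [] = arr[i.toNat] :=
    PySem.List.pyGetD_eq_getElem arr [] h0 (by omega)
  have hk : arr.countP (fun x => pvKey x < d) =
      (arr.map (fun x => x.headI)).countP (fun x => decide (x < d)) := by
    rw [List.countP_map]; rfl
  have hm : i.toNat < (arr.map (fun x => x.headI)).length := by simpa using hlt
  have base := pv_countP_lt_char (arr.map (fun x => x.headI)) d hs i.toNat hm
  rw [List.getElem_map] at base
  rw [hg, hk]
  simp only [pvKey] at base ⊢
  constructor
  · intro h
    have := base.mp h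
    omega
  · intro h
    exact base.mpr (by omega)

-- A's binary search computes c whenever "key < d ↔ index < c" holds on all valid indices.
theorem pvBisect_eq (arr : List (List Int)) (d c : Int)
    (hc : ∀ i : Int, 0 ≤ i → i < (arr.length : Int) →
        (pvKey (PySem.List.pyGetD arr i []) < d ↔ i < c))
    (l r : Int) (h0 : 0 ≤ l) (h1 : l ≤ c) (h2 : c ≤ r) (h3 : r ≤ (arr.length : Int) - 1) :
    pvBisect arr d l r = c := by
  by_cases hlr : l < r
  · have hm : l ≤ PySem.Int.floordiv (l + r) 2 ∧ PySem.Int.floordiv (l + r) 2 ≤ r :=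
      PySem.Int.floordiv_two_mid_bounds (by omega)
    have hmr : PySem.Int.floordiv (l + r) 2 < r := by
      rw [PySem.Int.floordiv_lt_iff_lt_mul (by omega)]; omega
    have hmid := hc (PySem.Int.floordiv (l + r) 2) (by omega) (by omega)
    rw [pvBisect]
    simp only [dif_pos hlr]
    by_cases hkey : pvKey (PySem.List.pyGetD arr (PySem.Int.floordiv (l + r) 2) []) < d
    · rw [if_pos hkey]
      have hlc : PySem.Int.floordiv (l + r) 2 < c := hmid.mp hkey
      exact pvBisect_eq arr d c hc _ r (by omega) (by omega) h2 h3
    · rw [if_neg hkey]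
      have hcm : c ≤ PySem.Int.floordiv (l + r) 2 := by
        by_contra hcon
        exact hkey (hmid.mpr (by omega))
      exact pvBisect_eq arr d c hc l _ h0 h1 hcm (by omega)
  · rw [pvBisect]
    simp only [dif_neg hlr]
    omega
termination_by (r - l).toNat
decreasing_by
  · omega
  · omega

-- ===== VERDICT (by name: the statement is the Claim_ definition above) =====
theorem limited_insert_spec : Claim_equal_limited_insert := by
  intro arr item difference num_patches _hdom hpre
  unfold Spec_limited_insert limited_insert limited_insert_alt
  unfold Pre_limited_insert at hpre
  by_cases hfill : (arr.length : Int) < num_patches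
  · simp only [if_pos hfill]
  · rw [if_neg hfill] at hpre
    obtain ⟨hne, _hlastne, hrest⟩ := hpre
    have hlastD : arr.getLastD [] = arr.getLast hne := by
      rw [List.getLastD_eq_getLast?, List.getLast?_eq_some_getLast hne]
      rfl
    have hgl : PySem.List.pyGetD arr (-1) [] = arr.getLastD [] := by
      rw [PySem.List.pyGetD_neg_one arr [] hne, hlastD]
    simp only [if_neg hfill]
    by_cases hgate : difference < pvKey (PySem.List.pyGetD arr (-1) [])
    · obtain ⟨hlen, _hnonempty, hsorted⟩ := hrest (by rw [hgl] at hgate; exact hgate)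
      have hlenpos : 1 ≤ arr.length := List.length_pos_iff.mpr hne
      have hc := fun i hi0 hi1 =>
        pv_key_char arr difference hsorted i hi0 hi1
      have hlastkey : ¬ pvKey (PySem.List.pyGetD arr ((arr.length : Int) - 1) []) < difference := by
        have hgidx : PySem.List.pyGetD arr ((arr.length : Int) - 1) [] = arr[((arr.length : Int) - 1).toNat] :=
          PySem.List.pyGetD_eq_getElem arr [] (by omega) (by omega)
        have hidx : ((arr.length : Int) - 1).toNat = arr.length - 1 := by omega
        have hgl2 : arr[((arr.length : Int) - 1).toNat] = arr.getLast hne := by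
          simp only [hidx]
          rw [List.getLast_eq_getElem]
        rw [hgidx, hgl2, ← hlastD, ← hgl]
        omega
      have hcle : (arr.countP (fun x => pvKey x < difference) : Int) ≤ (arr.length : Int) - 1 := by
        by_contra hcon
        exact hlastkey ((hc ((arr.length : Int) - 1) (by omega) (by omega)).mpr (by omega))
      have hpos : pvBisect arr difference 0 (num_patches - 1) =
          (arr.countP (fun x => pvKey x < difference) : Int) := by
        apply pvBisect_eq arr difference _ hc 0 (num_patches - 1) le_rfl
          (by positivity) (by omega) (by omega)
      rw [if_pos hgate, if_pos hgate, hpos]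
    · rw [if_neg hgate, if_neg hgate]
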